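-- pv_equiv track=rewrite | github.com/AlbertVeli/AdventOfCode | 2025/02/day2.py | is_invalid_id_2
-- ===== SOURCE A (Python) =====
-- def is_invalid_id_2(n):
--     s = str(n)
--     L = len(s)
--
--     for period_len in range(1, L // 2 + 1):
--         if L % period_len != 0:
--             # not divisible
--             continue
--
--         repeats = L // period_len
--         if repeats < 2:
--             continue
--
--         pattern = s[:period_len]
--         if pattern * repeats == s:
--             return True
--
--     return False
-- ===== SOURCE B (Python) =====
-- def is_invalid_id_2(n):
--     # Rotation test: s is a repetition of a shorter pattern iff some proper
--     # divisor-length rotation of s equals s.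
--     s = str(n)
--     L = len(s)
--     return any(L % d == 0 and s[d:] + s[:d] == s for d in range(1, L))
-- ===== Notes on version B (the rewrite author's own statement) =====
-- stated objective: idiomatic
-- what changed: A builds pattern*repeats for each candidate divisor length and compares; B is a single any() over rotation fixed points, testing s[d:]+s[:d] == s at each divisor shift d (equivalent by the commuting-words periodicity lemma, proved in Lean).
import Mathlib
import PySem

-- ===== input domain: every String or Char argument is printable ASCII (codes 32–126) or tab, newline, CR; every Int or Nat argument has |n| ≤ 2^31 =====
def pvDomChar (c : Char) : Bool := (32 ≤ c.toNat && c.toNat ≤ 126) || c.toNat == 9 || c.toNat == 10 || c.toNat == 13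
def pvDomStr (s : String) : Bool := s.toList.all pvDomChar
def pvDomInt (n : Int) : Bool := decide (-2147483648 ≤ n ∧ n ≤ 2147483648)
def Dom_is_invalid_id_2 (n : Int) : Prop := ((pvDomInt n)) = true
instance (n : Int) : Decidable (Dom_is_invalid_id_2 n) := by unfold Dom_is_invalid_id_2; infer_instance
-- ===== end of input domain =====

-- B replaces A's divisor loop building 'pattern * repeats' by a single any() over
-- rotation fixed points (s[d:] + s[:d] == s at divisor shifts) — objective: idiomatic.

-- ===== PORT A =====
-- the for-loop over range(1, L//2+1) with early 'return True'
def pvLoopA (s : List Char) (L : Int) : List Int → Bool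
  | [] => false
  | period_len :: rest =>
    if PySem.Int.mod L period_len ≠ 0 then pvLoopA s L rest
    else
      let repeats := PySem.Int.floordiv L period_len
      if repeats < 2 then pvLoopA s L rest
      else
        let pattern := PySem.List.slice s none (some period_len)
        if PySem.List.pyRepeat pattern repeats = s then true
        else pvLoopA s L rest

def is_invalid_id_2 (n : Int) : Bool :=
  let s := PySem.Int.toChars n
  let L : Int := (s.length : Int)
  pvLoopA s L (PySem.List.pyRange 1 (PySem.Int.floordiv L 2 + 1))

-- ===== PORT B =====
def is_invalid_id_2_alt (n : Int) : Bool :=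
  let s := PySem.Int.toChars n
  let L : Int := (s.length : Int)
  (PySem.List.pyRange 1 L).any fun d =>
    decide (PySem.Int.mod L d = 0) &&
      decide (PySem.List.slice s (some d) none ++ PySem.List.slice s none (some d) = s)

-- ===== PRECONDITION & SPEC =====
def Spec_is_invalid_id_2 (n : Int) (out : Bool) : Prop := out = is_invalid_id_2_alt n
instance (n : Int) (out : Bool) : Decidable (Spec_is_invalid_id_2 n out) := by unfold Spec_is_invalid_id_2; infer_instance

-- ===== CLAIM (what is proved, stated in full; the proofs are below) =====
def Claim_equal_is_invalid_id_2 : Prop := ∀ (n : Int), Dom_is_invalid_id_2 n → Spec_is_invalid_id_2 n (is_invalid_id_2 n)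

-- ===== LEMMAS AND PROOFS =====

-- A's loop with early return is an 'any' over the same list
theorem pvLoopA_eq_any (s : List Char) (L : Int) (ds : List Int) :
    pvLoopA s L ds = ds.any (fun d =>
      decide (PySem.Int.mod L d = 0) &&
      !decide (PySem.Int.floordiv L d < 2) &&
      decide (PySem.List.pyRepeat (PySem.List.slice s none (some d)) (PySem.Int.floordiv L d) = s)) := by
  induction ds with
  | nil => simp [pvLoopA]
  | cons d rest ih =>
    simp only [pvLoopA, List.any_cons, ih]
    split_ifs <;> simp_all

-- a word commuting with a nonempty word whose length divides its own is a power of it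
theorem pv_rep_of_comm {α : Type} :
    ∀ (N : ℕ) (t u : List α), t ≠ [] → u.length ≤ N → t.length ∣ u.length →
      u ++ t = t ++ u → u = (List.replicate (u.length / t.length) t).flatten := by
  intro N
  induction N with
  | zero =>
    intro t u ht hN _ _
    have : u = [] := List.eq_nil_of_length_eq_zero (Nat.le_zero.mp hN)
    subst this; simp
  | succ N ih =>
    intro t u ht hN hdvd hcomm
    rcases eq_or_ne u [] with rfl | hu
    · simp
    · have htpos : 0 < t.length := List.length_pos_iff.mpr ht
      have hupos : 0 < u.length := List.length_pos_iff.mpr hu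
      have hle : t.length ≤ u.length := Nat.le_of_dvd hupos hdvd
      have htake : u.take t.length = t := by
        have h1 : (u ++ t).take t.length = u.take t.length :=
          List.take_append_of_le_length hle
        have h2 : (t ++ u).take t.length = t := List.take_left
        rw [hcomm, h2] at h1; exact h1.symm
      set u' := u.drop t.length with hu'
      have hsplit : u = t ++ u' := by
        conv_lhs => rw [← List.take_append_drop t.length u]
        rw [htake]
      have hcomm' : u' ++ t = t ++ u' := by
        have : (t ++ u') ++ t = t ++ (t ++ u') := by rw [← hsplit, hcomm]
        rw [List.append_assoc] at this
        exact List.append_cancel_left this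
      have hlen' : u'.length = u.length - t.length := by simp [hu']
      have hdvd' : t.length ∣ u'.length := by
        rw [hlen']; exact Nat.dvd_sub hdvd dvd_rfl
      have hN' : u'.length ≤ N := by omega
      have hrec := ih t u' ht hN' hdvd' hcomm'
      have hdivsucc : u.length / t.length = u'.length / t.length + 1 := by
        have : u.length = u'.length + t.length := by omega
        rw [this, Nat.add_div_right _ htpos]
      rw [hdivsucc, List.replicate_succ, List.flatten_cons, ← hrec]
      exact hsplit

-- the pattern-replication test equals the rotation fixed-point test at a proper divisor
theorem pv_key (s : List Char) (k : ℕ) (hk : 1 ≤ k) (hdvd : k ∣ s.length)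
    (hlt : k < s.length) :
    ((List.replicate (s.length / k) (s.take k)).flatten = s) ↔
      (s.drop k ++ s.take k = s) := by
  have hkle : k ≤ s.length := le_of_lt hlt
  have htlen : (s.take k).length = k := by simp [hkle]
  have htne : s.take k ≠ [] := by
    intro h
    have := congrArg List.length h
    simp [htlen] at this; omega
  set t := s.take k with ht
  constructor
  · intro hrep
    have hm2 : 2 ≤ s.length / k := by
      have hmul : k * (s.length / k) = s.length := Nat.mul_div_cancel' hdvd
      by_contra h
      interval_cases h' : s.length / k <;> omega
    obtain ⟨m, hm⟩ : ∃ m, s.length / k = m + 1 := ⟨s.length / k - 1, by omega⟩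
    have hs : s = t ++ (List.replicate m t).flatten := by
      have hs' := hrep.symm
      rw [hm, List.replicate_succ, List.flatten_cons] at hs'
      exact hs'
    have hXt : (List.replicate m t).flatten ++ t = t ++ (List.replicate m t).flatten := by
      calc (List.replicate m t).flatten ++ t
          = (List.replicate m t ++ [t]).flatten := by simp [List.flatten_append]
        _ = (List.replicate (m + 1) t).flatten := by rw [← List.replicate_succ']
        _ = t ++ (List.replicate m t).flatten := by
            rw [List.replicate_succ, List.flatten_cons]
    rw [hs, ← htlen, List.drop_left]
    exact hXt
  · intro hrot
    have hcomm : s.drop k ++ t = t ++ s.drop k := by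
      rw [hrot, ht, List.take_append_drop]
    have hdvd' : t.length ∣ (s.drop k).length := by
      rw [htlen, List.length_drop]; exact Nat.dvd_sub hdvd dvd_rfl
    have hrec := pv_rep_of_comm (s.drop k).length t (s.drop k) htne le_rfl hdvd' hcomm
    rw [htlen, List.length_drop] at hrec
    have hdivsucc : s.length / k = (s.length - k) / k + 1 := by
      have h1 : s.length = (s.length - k) + k := by omega
      conv_lhs => rw [h1]
      rw [Nat.add_div_right _ (by omega : 0 < k)]
    rw [hdivsucc, List.replicate_succ, List.flatten_cons, ← hrec, ht,
      List.take_append_drop]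

-- the whole equivalence, over an arbitrary character list
theorem pv_main (s : List Char) :
    pvLoopA s (s.length : Int) (PySem.List.pyRange 1 (PySem.Int.floordiv (s.length : Int) 2 + 1)) =
    (PySem.List.pyRange 1 (s.length : Int)).any (fun d =>
      decide (PySem.Int.mod (s.length : Int) d = 0) &&
      decide (PySem.List.slice s (some d) none ++ PySem.List.slice s none (some d) = s)) := by
  rw [pvLoopA_eq_any, Bool.eq_iff_iff]
  simp only [List.any_eq_true, PySem.List.mem_pyRange_one, Bool.and_eq_true,
    Bool.not_eq_true', decide_eq_true_eq, decide_eq_false_iff_not, and_assoc]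
  have hcast2 : PySem.Int.floordiv ((s.length : Int)) 2 = ((s.length / 2 : ℕ) : ℤ) := by
    rw [show (2 : ℤ) = ((2 : ℕ) : ℤ) by norm_num, PySem.Int.floordiv_natCast]
  rw [hcast2]
  constructor
  · rintro ⟨d, hd1, hd2, hmod, hrep2, hrep⟩
    lift d to ℕ using (by omega) with k
    rw [PySem.Int.mod_natCast] at hmod
    rw [PySem.Int.floordiv_natCast] at hrep2 hrep
    rw [PySem.List.slice_to_natCast] at hrep
    have hk1 : 1 ≤ k := by exact_mod_cast hd1
    have hkdvd : k ∣ s.length := Nat.dvd_of_mod_eq_zero (by exact_mod_cast hmod)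
    have hm2 : 2 ≤ s.length / k := by
      by_contra h
      exact hrep2 (by exact_mod_cast (show s.length / k < 2 by omega))
    have hmul : k * (s.length / k) = s.length := Nat.mul_div_cancel' hkdvd
    have hklt : k < s.length := by nlinarith
    have hrot := (pv_key s k hk1 hkdvd hklt).mp
      (by simpa [PySem.List.pyRepeat] using hrep)
    exact ⟨(k : ℤ), hd1, by exact_mod_cast hklt,
      by rw [PySem.Int.mod_natCast]; exact_mod_cast hmod,
      by rw [PySem.List.slice_from_natCast, PySem.List.slice_to_natCast]; exact hrot⟩
  · rintro ⟨d, hd1, hd2, hmod, hrot⟩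
    lift d to ℕ using (by omega) with k
    rw [PySem.Int.mod_natCast] at hmod
    rw [PySem.List.slice_from_natCast, PySem.List.slice_to_natCast] at hrot
    have hk1 : 1 ≤ k := by exact_mod_cast hd1
    have hklt : k < s.length := by exact_mod_cast hd2
    have hkdvd : k ∣ s.length := Nat.dvd_of_mod_eq_zero (by exact_mod_cast hmod)
    have hmul : k * (s.length / k) = s.length := Nat.mul_div_cancel' hkdvd
    have hm2 : 2 ≤ s.length / k := by
      by_contra h
      interval_cases h' : s.length / k <;> omega
    have h2k : 2 * k ≤ s.length := by nlinarith
    have hk2 : k ≤ s.length / 2 := (Nat.le_div_iff_mul_le (by omega)).mpr (by omega)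
    refine ⟨(k : ℤ), hd1, ?_,
      by rw [PySem.Int.mod_natCast]; exact_mod_cast hmod, ?_, ?_⟩
    · exact_mod_cast Nat.lt_succ_of_le hk2
    · rw [PySem.Int.floordiv_natCast]
      intro hcon
      exact absurd (by exact_mod_cast hcon : s.length / k < 2) (by omega)
    · rw [PySem.Int.floordiv_natCast, PySem.List.slice_to_natCast]
      have hrep := (pv_key s k hk1 hkdvd hklt).mpr hrot
      simpa [PySem.List.pyRepeat] using hrep

-- ===== VERDICT (by name: the statement is the Claim_ definition above) =====
theorem is_invalid_id_2_spec : Claim_equal_is_invalid_id_2 := by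
  intro n _
  unfold Spec_is_invalid_id_2 is_invalid_id_2 is_invalid_id_2_alt
  exact pv_main (PySem.Int.toChars n)
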